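-- pv_equiv track=rewrite | github.com/dataOtter/CodeFights-Python3 | arcade1_4-6_product,polygon_area,array.py | make_array_consecutive
-- ===== SOURCE A (Python) =====
-- def make_array_consecutive(statues):
--     """Input: An array of distinct non-negative integers.
--     Guaranteed constraints: 1 ≤ statues.length ≤ 10, 0 ≤ statues[i] ≤ 20.
--     Output: Returns the number of statues to be added to fulfill the above task."""
--     statues_ordered = sorted(statues)
--     statues_to_add = 0
--
--     for statue_index in range(len(statues_ordered)-1):
--         current_statue = statues_ordered[statue_index]
--         next_statue = statues_ordered[statue_index + 1]
--         # if next_statue is equal to current_statue + 1, no statues need to be added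
--         statues_to_add += next_statue - current_statue - 1
--
--     return statues_to_add
-- ===== SOURCE B (Python) =====
-- def make_array_consecutive(statues):
--     if not statues:
--         return 0
--     return max(statues) - min(statues) + 1 - len(statues)
-- ===== Notes on version B (the rewrite author's own statement) =====
-- stated objective: faster
-- what changed: Replaced the sort-then-scan over adjacent gaps by the closed form max - min + 1 - len (the per-gap sum telescopes), with a single empty-list guard returning 0 as A does.
import Mathlib
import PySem

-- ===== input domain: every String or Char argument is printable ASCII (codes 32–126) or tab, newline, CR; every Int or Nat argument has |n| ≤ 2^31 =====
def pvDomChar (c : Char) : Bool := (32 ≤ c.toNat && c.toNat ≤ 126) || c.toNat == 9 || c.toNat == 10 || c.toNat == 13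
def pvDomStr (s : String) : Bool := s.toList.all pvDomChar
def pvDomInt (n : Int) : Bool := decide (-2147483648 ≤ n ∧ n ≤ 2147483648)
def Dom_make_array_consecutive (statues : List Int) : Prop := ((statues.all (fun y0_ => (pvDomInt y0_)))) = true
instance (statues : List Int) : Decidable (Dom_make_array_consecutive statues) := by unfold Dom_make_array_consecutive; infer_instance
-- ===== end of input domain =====

-- B replaces A's sort-then-adjacent-gap scan by the closed form max - min + 1 - len
-- (the gap sum telescopes); one empty-list guard returns 0 exactly as A does (measured faster; no sort).

-- ===== PORT A =====
-- sorted(statues); then for each adjacent pair of the sorted list, add (next - current - 1).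
-- Indexing is always in range (indices 0..len-2 and their successors), so Python never
-- raises here; .getD 0 on pyGet? is exact on these in-range accesses.
def make_array_consecutive (statues : List Int) : Int :=
  let statues_ordered := PySem.List.sorted statues (fun x => x) false
  (PySem.List.pyRange 0 ((statues_ordered.length : Int) - 1) 1).foldl
    (fun statues_to_add statue_index =>
      let current_statue := (PySem.List.pyGet? statues_ordered statue_index).getD 0
      let next_statue := (PySem.List.pyGet? statues_ordered (statue_index + 1)).getD 0
      statues_to_add + (next_statue - current_statue - 1)) 0

-- ===== PORT B =====
def make_array_consecutive_alt (statues : List Int) : Int :=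
  if statues = [] then 0
  else (PySem.List.max? statues (fun x => x)).getD 0
     - (PySem.List.min? statues (fun x => x)).getD 0
     + 1 - (statues.length : Int)

-- ===== PRECONDITION & SPEC =====
def Spec_make_array_consecutive (statues : List Int) (out : Int) : Prop := out = make_array_consecutive_alt statues
instance (statues : List Int) (out : Int) : Decidable (Spec_make_array_consecutive statues out) := by unfold Spec_make_array_consecutive; infer_instance

-- ===== CLAIM (what is proved, stated in full; the proofs are below) =====
def Claim_equal_make_array_consecutive : Prop := ∀ (statues : List Int), Dom_make_array_consecutive statues → Spec_make_array_consecutive statues (make_array_consecutive statues)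

-- ===== LEMMAS AND PROOFS =====

-- A's gap loop over the sorted list telescopes: it equals last - first - (len - 1).
lemma gap_fold_telescopes (s : List Int) (hne : s ≠ []) :
    (PySem.List.pyRange 0 ((s.length : Int) - 1) 1).foldl
      (fun acc i => acc + ((PySem.List.pyGet? s (i + 1)).getD 0 - (PySem.List.pyGet? s i).getD 0 - 1)) 0
    = s.getD (s.length - 1) 0 - s.getD 0 0 - ((s.length : Int) - 1) := by
  have hn : 1 ≤ s.length := List.length_pos_iff.mpr hne
  have hcast : ((s.length : Int) - 1) = ((s.length - 1 : Nat) : Int) := by omega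
  rw [hcast, PySem.List.pyRange_zero_natCast, List.foldl_map, PySem.List.foldl_add]
  have hterm : ∀ k ∈ List.range (s.length - 1),
      ((PySem.List.pyGet? s ((k : Int) + 1)).getD 0 - (PySem.List.pyGet? s (k : Int)).getD 0 - 1)
      = (s.getD (k+1) 0 - s.getD k 0 - 1) := by
    intro k hk
    have hc : ((k : Int) + 1) = ((k + 1 : Nat) : Int) := by push_cast; ring
    rw [hc, PySem.List.pyGet?_natCast, PySem.List.pyGet?_natCast]
    simp [List.getD_eq_getElem?_getD]
  rw [List.map_congr_left hterm]
  have hsum : ((List.range (s.length - 1)).map (fun k => s.getD (k+1) 0 - s.getD k 0 - 1)).sum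
      = ∑ i ∈ Finset.range (s.length - 1), (s.getD (i+1) 0 - s.getD i 0 - 1) := rfl
  rw [hsum]
  have h2 : ∑ i ∈ Finset.range (s.length - 1), (s.getD (i+1) 0 - s.getD i 0 - 1)
      = (∑ i ∈ Finset.range (s.length - 1), (s.getD (i+1) 0 - s.getD i 0)) - (s.length - 1 : Nat) := by
    rw [Finset.sum_sub_distrib]; simp
  rw [h2, Finset.sum_range_sub (fun i => s.getD i 0)]
  omega

-- On a nonempty list, Python max(xs) is the last element of sorted(xs).
lemma max_eq_sorted_last (xs : List Int) (hne : xs ≠ []) :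
    (PySem.List.max? xs (fun x => x)).getD 0
      = (PySem.List.sorted xs (fun x => x) false).getD ((PySem.List.sorted xs (fun x => x) false).length - 1) 0 := by
  set t := PySem.List.sorted xs (fun x => x) false with ht
  have hperm : t.Perm xs := PySem.List.sorted_perm xs (fun x => x) false
  have htne : t ≠ [] := by
    intro h; exact hne (by simpa [h] using (PySem.List.sorted_eq_nil_iff xs (fun x => x) false).mp h)
  have hlt : t.length - 1 < t.length := by
    have := List.length_pos_iff.mpr htne; omega
  obtain ⟨m, hm⟩ : ∃ m, PySem.List.max? xs (fun x => x) = some m := by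
    cases h : PySem.List.max? xs (fun x => x) with
    | none => exact absurd ((PySem.List.max?_eq_none_iff xs _).mp h) hne
    | some m => exact ⟨m, rfl⟩
  rw [hm, List.getD_eq_getElem t 0 hlt]
  have h1 : t[t.length - 1] ≤ m :=
    PySem.List.max?_isMax hm _ (hperm.mem_iff.mp (List.getElem_mem hlt))
  obtain ⟨j, hj, hje⟩ := List.mem_iff_getElem.mp (hperm.mem_iff.mpr (PySem.List.max?_mem hm))
  have h2 : m ≤ t[t.length - 1] := by
    have := PySem.List.sorted_id_getElem_mono xs (p := j) (q := t.length - 1) (by omega) (by rw [← ht]; omega)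
    simpa [← ht, hje] using this
  simp; omega

-- On a nonempty list, Python min(xs) is the first element of sorted(xs).
lemma min_eq_sorted_head (xs : List Int) (hne : xs ≠ []) :
    (PySem.List.min? xs (fun x => x)).getD 0
      = (PySem.List.sorted xs (fun x => x) false).getD 0 0 := by
  set t := PySem.List.sorted xs (fun x => x) false with ht
  have hperm : t.Perm xs := PySem.List.sorted_perm xs (fun x => x) false
  have htne : t ≠ [] := by
    intro h; exact hne (by simpa [h] using (PySem.List.sorted_eq_nil_iff xs (fun x => x) false).mp h)
  have hlt : 0 < t.length := List.length_pos_iff.mpr htne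
  obtain ⟨m, hm⟩ : ∃ m, PySem.List.min? xs (fun x => x) = some m := by
    cases h : PySem.List.min? xs (fun x => x) with
    | none => exact absurd ((PySem.List.min?_eq_none_iff xs _).mp h) hne
    | some m => exact ⟨m, rfl⟩
  rw [hm, List.getD_eq_getElem t 0 hlt]
  have h1 : m ≤ t[0] :=
    PySem.List.min?_isMin hm _ (hperm.mem_iff.mp (List.getElem_mem hlt))
  obtain ⟨j, hj, hje⟩ := List.mem_iff_getElem.mp (hperm.mem_iff.mpr (PySem.List.min?_mem hm))
  have h2 : t[0] ≤ m := by
    have := PySem.List.sorted_id_getElem_mono xs (p := 0) (q := j) (by omega) (by rw [← ht]; omega)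
    simpa [← ht, hje] using this
  simp; omega

-- ===== VERDICT (by name: the statement is the Claim_ definition above) =====
theorem make_array_consecutive_spec : Claim_equal_make_array_consecutive := by
  intro statues _
  unfold Spec_make_array_consecutive make_array_consecutive make_array_consecutive_alt
  by_cases hne : statues = []
  · subst hne; decide
  · simp only [if_neg hne]
    have hs : PySem.List.sorted statues (fun x => x) false ≠ [] := by
      simpa [PySem.List.sorted_eq_nil_iff] using hne
    have hlen : (PySem.List.sorted statues (fun x => x) false).length = statues.length :=
      (PySem.List.sorted_perm statues (fun x => x) false).length_eq
    rw [show (fun (statues_to_add : Int) (statue_index : Int) =>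
          let current_statue := (PySem.List.pyGet? (PySem.List.sorted statues (fun x => x) false) statue_index).getD 0
          let next_statue := (PySem.List.pyGet? (PySem.List.sorted statues (fun x => x) false) (statue_index + 1)).getD 0
          statues_to_add + (next_statue - current_statue - 1))
        = (fun acc i => acc + ((PySem.List.pyGet? (PySem.List.sorted statues (fun x => x) false) (i + 1)).getD 0
            - (PySem.List.pyGet? (PySem.List.sorted statues (fun x => x) false) i).getD 0 - 1)) from rfl]
    rw [gap_fold_telescopes _ hs, max_eq_sorted_last statues hne, min_eq_sorted_head statues hne, hlen]
    ring
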